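-- pv_equiv track=rewrite | github.com/galug/algorithm | python_algorithm/z_array.py | recursive_square
-- ===== SOURCE A (Python) =====
-- def recursive_square(n:int, row:int, column, start):
--     if n == 1:
--         return int(start + row*2 + column)
--     half_length = (2**n) // 2
--     if row <half_length and column < half_length:
--         return recursive_square(n-1, row, column, start)
--     elif row <half_length and column >= half_length:
--         return recursive_square(n-1, row, column % 2, start + 2**half_length)
--     elif row >= half_length and column < half_length:
--         return recursive_square(n-1, row % 2, column, start + (2**half_length)*2)
--     else:
--         return recursive_square(n-1, row % 2, column %2, start + (2**half_length)*3)
-- ===== SOURCE B (Python) =====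
-- def recursive_square(n: int, row: int, column, start):
--     # Iterative re-implementation: threads (row, column, start) through a
--     # while-loop instead of recursing.
--     while n > 1:
--         half_length = 2 ** (n - 1)
--         if row < half_length:
--             if column >= half_length:
--                 column %= 2
--                 start += 2 ** half_length
--         else:
--             if column < half_length:
--                 start += 2 * 2 ** half_length
--             else:
--                 column %= 2
--                 start += 3 * 2 ** half_length
--             row %= 2
--         n -= 1
--     return int(start + row * 2 + column)
-- ===== Notes on version B (the rewrite author's own statement) =====
-- stated objective: simpler
-- what changed: Recursion replaced by an iterative while-loop with mutable row/column/start and nested two-level branching instead of the four-way and-chain.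
import Mathlib
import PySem

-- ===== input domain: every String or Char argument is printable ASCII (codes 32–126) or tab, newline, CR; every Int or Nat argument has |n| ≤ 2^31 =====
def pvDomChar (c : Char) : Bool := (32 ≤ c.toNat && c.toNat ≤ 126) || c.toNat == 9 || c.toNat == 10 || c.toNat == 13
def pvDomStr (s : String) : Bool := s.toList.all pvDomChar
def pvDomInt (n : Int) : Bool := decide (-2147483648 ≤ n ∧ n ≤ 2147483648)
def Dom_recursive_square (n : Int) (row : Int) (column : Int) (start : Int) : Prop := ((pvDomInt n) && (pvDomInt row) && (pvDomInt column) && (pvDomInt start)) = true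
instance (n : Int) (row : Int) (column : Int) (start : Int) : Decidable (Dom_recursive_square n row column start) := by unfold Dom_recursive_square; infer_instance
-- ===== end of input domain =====

-- B replaces A's four-way recursive and-chain by an iterative while-loop (objective: simpler).

-- ===== PORT A =====
-- Literal port of A's recursion; Python diverges for n ≤ 0 (excluded by Pre_),
-- so the port returns the trivial loop-free value there to stay total.
def recursive_square (n : Int) (row : Int) (column : Int) (start : Int) : Int :=
  if n = 1 then start + row * 2 + column
  else if n < 1 then start + row * 2 + column   -- Python raises RecursionError here (outside Pre_)
  else
    let half_length : Int := PySem.Int.floordiv (2 ^ n.toNat) 2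
    if row < half_length ∧ column < half_length then
      recursive_square (n - 1) row column start
    else if row < half_length ∧ column ≥ half_length then
      recursive_square (n - 1) row (PySem.Int.mod column 2) (start + 2 ^ half_length.toNat)
    else if row ≥ half_length ∧ column < half_length then
      recursive_square (n - 1) (PySem.Int.mod row 2) column (start + (2 ^ half_length.toNat) * 2)
    else
      recursive_square (n - 1) (PySem.Int.mod row 2) (PySem.Int.mod column 2) (start + (2 ^ half_length.toNat) * 3)
  termination_by n.toNat
  decreasing_by all_goals omega

-- ===== PORT B =====
-- B's while-loop, one fuel unit per decrement of n (n.toNat fuel suffices: the loop runs n-1 times).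
def rsAltLoop : Nat → Int → Int → Int → Int → Int
  | 0, _, row, column, start => start + row * 2 + column
  | fuel + 1, n, row, column, start =>
    if n > 1 then
      let half_length : Int := 2 ^ (n - 1).toNat
      if row < half_length then
        if column ≥ half_length then
          rsAltLoop fuel (n - 1) row (PySem.Int.mod column 2) (start + 2 ^ half_length.toNat)
        else
          rsAltLoop fuel (n - 1) row column start
      else
        if column < half_length then
          rsAltLoop fuel (n - 1) (PySem.Int.mod row 2) column (start + 2 * 2 ^ half_length.toNat)
        else
          rsAltLoop fuel (n - 1) (PySem.Int.mod row 2) (PySem.Int.mod column 2) (start + 3 * 2 ^ half_length.toNat)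
    else start + row * 2 + column

def recursive_square_alt (n : Int) (row : Int) (column : Int) (start : Int) : Int :=
  rsAltLoop n.toNat n row column start

-- ===== PRECONDITION & SPEC =====
-- Pre_ excludes n ≤ 0, on which Python A recurses without a base case and raises RecursionError.
def Pre_recursive_square (n : Int) (row : Int) (column : Int) (start : Int) : Prop := 1 ≤ n
instance (n : Int) (row : Int) (column : Int) (start : Int) : Decidable (Pre_recursive_square n row column start) := by unfold Pre_recursive_square; infer_instance
def pvWitness_recursive_square : Int × Int × Int × Int := (3, 2, 5, 0)

def Spec_recursive_square (n : Int) (row : Int) (column : Int) (start : Int) (out : Int) : Prop := out = recursive_square_alt n row column start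
instance (n : Int) (row : Int) (column : Int) (start : Int) (out : Int) : Decidable (Spec_recursive_square n row column start out) := by unfold Spec_recursive_square; infer_instance

-- ===== CLAIM (what is proved, stated in full; the proofs are below) =====
def Claim_equal_recursive_square : Prop := ∀ (n : Int) (row : Int) (column : Int) (start : Int), Dom_recursive_square n row column start → Pre_recursive_square n row column start → Spec_recursive_square n row column start (recursive_square n row column start)

-- ===== LEMMAS AND PROOFS =====

-- A's recursion equals B's loop run with fuel m = n.toNat, for every n ≥ 1.
theorem rs_eq_loop (m : Nat) : ∀ (n row column start : Int), n.toNat = m → 1 ≤ n →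
    recursive_square n row column start = rsAltLoop m n row column start := by
  induction m with
  | zero => intro n row column start hm hn; omega
  | succ m ih =>
    intro n row column start hm hn
    by_cases h1 : n = 1
    · subst h1
      rw [recursive_square]
      simp [rsAltLoop]
    · have h2 : 2 ≤ n := by omega
      have hm' : (n - 1).toNat = m := by omega
      have hn' : 1 ≤ n - 1 := by omega
      rw [recursive_square]
      simp only [rsAltLoop, if_neg h1, if_neg (by omega : ¬ n < 1), if_pos (by omega : n > 1)]
      have hhalf : PySem.Int.floordiv (2 ^ n.toNat) 2 = (2 : Int) ^ (n - 1).toNat := by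
        have : n.toNat = (n - 1).toNat + 1 := by omega
        rw [this, pow_succ, PySem.Int.floordiv_eq_ediv_of_pos (by norm_num)]
        rw [Int.mul_ediv_cancel _ (by norm_num)]
      rw [hhalf]
      set h : Int := (2 : Int) ^ (n - 1).toNat with hh
      by_cases hr : row < h
      · rw [if_pos hr]
        by_cases hc : column < h
        · rw [if_pos ⟨hr, hc⟩, if_neg (by omega : ¬ column ≥ h)]
          exact ih _ _ _ _ hm' hn'
        · rw [if_neg (by tauto), if_pos ⟨hr, by omega⟩, if_pos (by omega : column ≥ h)]
          exact ih _ _ _ _ hm' hn'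
      · rw [if_neg hr]
        by_cases hc : column < h
        · rw [if_neg (by tauto), if_neg (by tauto), if_pos ⟨by omega, hc⟩, if_pos hc,
              show start + 2 ^ h.toNat * 2 = start + 2 * 2 ^ h.toNat by ring]
          exact ih _ _ _ _ hm' hn'
        · rw [if_neg (by tauto), if_neg (by tauto), if_neg (by tauto), if_neg hc,
              show start + 2 ^ h.toNat * 3 = start + 3 * 2 ^ h.toNat by ring]
          exact ih _ _ _ _ hm' hn'

-- ===== VERDICT (by name: the statement is the Claim_ definition above) =====
theorem recursive_square_spec : Claim_equal_recursive_square := by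
  intro n row column start _ hpre
  unfold Spec_recursive_square recursive_square_alt
  exact rs_eq_loop n.toNat n row column start rfl hpre
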